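-- pv_equiv track=rewrite | github.com/mithem/EpidemicSimulation | episimlib/utils.py | get_neighbor_coords
-- ===== SOURCE A (Python) =====
-- def get_neighbor_coords(c: tuple, d: int, boundary_length: int):
--     """return list of neighbors coordinates from `c`, max distance `d` away. `boundary_length`specifies how big the coordinate system is. Implies it starts at (0, 0)."""
--     result = []
--     for x in range(0-d, d + 1):
--         a_x = c[0] + x  # absolute x coord
--         for y in range(0 - d, d + 1):
--             a_y = c[1] + y  # absolute y coord
--             if a_x >= 0 and a_x < boundary_length - 1:  # within x boundaries
--                 if a_y >= 0 and a_y < boundary_length - 1:  # within y boundaries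
--                     if x != 0 or y != 0:  # not the same coordinate
--                         result.append((a_x, a_y))
--     return result
-- ===== SOURCE B (Python) =====
-- def get_neighbor_coords(c: tuple, d: int, boundary_length: int):
--     """return list of neighbors coordinates from `c`, max distance `d` away. `boundary_length`specifies how big the coordinate system is. Implies it starts at (0, 0)."""
--     xlo = max(0, c[0] - d)
--     xhi = min(c[0] + d, boundary_length - 2)
--     ylo = max(0, c[1] - d)
--     yhi = min(c[1] + d, boundary_length - 2)
--     nx = xhi - xlo + 1
--     ny = yhi - ylo + 1
--     if nx <= 0 or ny <= 0:
--         return []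
--     # decode one flat index range into row-major (x, y) pairs
--     cells = [(xlo + i // ny, ylo + i % ny) for i in range(nx * ny)]
--     if xlo <= c[0] <= xhi and ylo <= c[1] <= yhi:
--         del cells[(c[0] - xlo) * ny + (c[1] - ylo)]
--     return cells
-- ===== Notes on version B (the rewrite author's own statement) =====
-- stated objective: alternative
-- what changed: B replaces the nested relative-offset scan with per-cell bounds guards by closed-form arithmetic: it clamps the rectangle, enumerates one flat index range(nx*ny) decoding each index with divmod into an absolute cell, and deletes the single center cell by its computed flat index instead of testing every cell.
import Mathlib
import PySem

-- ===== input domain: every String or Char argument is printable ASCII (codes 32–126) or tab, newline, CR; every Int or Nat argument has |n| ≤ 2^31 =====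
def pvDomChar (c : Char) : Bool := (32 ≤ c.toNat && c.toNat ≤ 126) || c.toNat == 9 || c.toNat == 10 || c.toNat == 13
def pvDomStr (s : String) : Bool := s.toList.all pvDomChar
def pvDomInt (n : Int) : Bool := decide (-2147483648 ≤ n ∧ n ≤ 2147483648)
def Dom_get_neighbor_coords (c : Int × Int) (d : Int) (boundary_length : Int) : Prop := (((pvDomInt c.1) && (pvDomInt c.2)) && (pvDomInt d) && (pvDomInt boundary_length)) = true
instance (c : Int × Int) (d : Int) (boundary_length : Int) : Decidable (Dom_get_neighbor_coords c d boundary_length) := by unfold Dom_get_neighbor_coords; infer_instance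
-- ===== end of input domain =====

-- B enumerates one flat index range nx*ny over the clamped rectangle, decoding each
-- index with divmod into an absolute cell, and deletes the center by its computed flat
-- index — instead of A's nested relative-offset scan with per-cell bounds guards.

-- ===== PORT A =====
def get_neighbor_coords (c : Int × Int) (d : Int) (boundary_length : Int) : List (Int × Int) :=
  (PySem.List.pyRange (0 - d) (d + 1) 1).foldl (fun result x =>
    let a_x := c.1 + x
    (PySem.List.pyRange (0 - d) (d + 1) 1).foldl (fun result y =>
      let a_y := c.2 + y
      if a_x ≥ 0 ∧ a_x < boundary_length - 1 then
        if a_y ≥ 0 ∧ a_y < boundary_length - 1 then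
          if x ≠ 0 ∨ y ≠ 0 then result ++ [(a_x, a_y)]
          else result
        else result
      else result) result) []

-- ===== PORT B =====
def get_neighbor_coords_alt (c : Int × Int) (d : Int) (boundary_length : Int) : List (Int × Int) :=
  let xlo := max 0 (c.1 - d)
  let xhi := min (c.1 + d) (boundary_length - 2)
  let ylo := max 0 (c.2 - d)
  let yhi := min (c.2 + d) (boundary_length - 2)
  let nx := xhi - xlo + 1
  let ny := yhi - ylo + 1
  if nx ≤ 0 ∨ ny ≤ 0 then []
  else
    -- decode one flat index range into row-major (x, y) pairs
    let cells := (PySem.List.pyRange 0 (nx * ny) 1).map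
      (fun i => (xlo + PySem.Int.floordiv i ny, ylo + PySem.Int.mod i ny))
    if xlo ≤ c.1 ∧ c.1 ≤ xhi ∧ ylo ≤ c.2 ∧ c.2 ≤ yhi then
      -- del cells[k]: k is in range here, so Python's del is List.eraseIdx
      cells.eraseIdx ((c.1 - xlo) * ny + (c.2 - ylo)).toNat
    else cells

-- ===== PRECONDITION & SPEC =====
def Spec_get_neighbor_coords (c : Int × Int) (d : Int) (boundary_length : Int) (out : List (Int × Int)) : Prop := out = get_neighbor_coords_alt c d boundary_length
instance (c : Int × Int) (d : Int) (boundary_length : Int) (out : List (Int × Int)) : Decidable (Spec_get_neighbor_coords c d boundary_length out) := by unfold Spec_get_neighbor_coords; infer_instance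

-- ===== CLAIM (what is proved, stated in full; the proofs are below) =====
def Claim_equal_get_neighbor_coords : Prop := ∀ (c : Int × Int) (d : Int) (boundary_length : Int), Dom_get_neighbor_coords c d boundary_length → Spec_get_neighbor_coords c d boundary_length (get_neighbor_coords c d boundary_length)

-- ===== LEMMAS AND PROOFS =====

-- range shift: adding a constant to every element of range(a,b) gives range(k+a,k+b)
theorem pyRange_shift (k a b : Int) :
    (PySem.List.pyRange a b 1).map (fun v => k + v) = PySem.List.pyRange (k + a) (k + b) 1 := by
  rw [PySem.List.pyRange_one a b, PySem.List.pyRange_one (k + a) (k + b)]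
  have h : (k + b) - (k + a) = b - a := by ring
  rw [h, List.map_map]
  exact List.map_congr_left (fun j _ => by simp; ring)

-- filtering an integer range by an interval test is the intersected range
theorem pyRange_filter_interval (a b lo hi : Int) :
    (PySem.List.pyRange a b 1).filter (fun v => decide (lo ≤ v ∧ v < hi))
      = PySem.List.pyRange (max a lo) (min b hi) 1 := by
  by_cases hab : b ≤ a
  · rw [PySem.List.pyRange_one_eq_nil hab, PySem.List.pyRange_one_eq_nil (by omega)]
    rfl
  · push Not at hab
    rw [PySem.List.pyRange_one_cons hab]
    by_cases hin : lo ≤ a ∧ a < hi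
    · have : (PySem.List.pyRange (a+1) b 1).filter (fun v => decide (lo ≤ v ∧ v < hi))
          = PySem.List.pyRange (max (a+1) lo) (min b hi) 1 := pyRange_filter_interval (a+1) b lo hi
      simp only [List.filter_cons, decide_eq_true_eq, hin, this]
      rw [show max (a+1) lo = a + 1 by omega, show max a lo = a by omega,
        PySem.List.pyRange_one_cons (by omega : a < min b hi)]
      simp
    · have : (PySem.List.pyRange (a+1) b 1).filter (fun v => decide (lo ≤ v ∧ v < hi))
          = PySem.List.pyRange (max (a+1) lo) (min b hi) 1 := pyRange_filter_interval (a+1) b lo hi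
      simp only [List.filter_cons, decide_eq_true_eq, hin, this]
      by_cases hlo : a < lo
      · rw [show max (a+1) lo = lo by omega, show max a lo = lo by omega]; simp
      · rw [PySem.List.pyRange_one_eq_nil (by omega), PySem.List.pyRange_one_eq_nil (by omega)]; simp
termination_by (b - a).toNat
decreasing_by all_goals omega

-- flatMap is unchanged by dropping elements whose image is empty
theorem flatMap_filter_of_nil {α β : Type} (l : List α) (p : α → Bool) (g : α → List β)
    (h : ∀ x ∈ l, p x = false → g x = []) :
    l.flatMap g = (l.filter p).flatMap g := by
  induction l with
  | nil => rfl
  | cons a t ih =>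
    rw [List.flatMap_cons, List.filter_cons]
    by_cases hp : p a
    · rw [if_pos hp, List.flatMap_cons, ih (fun x hx => h x (List.mem_cons_of_mem a hx))]
    · rw [if_neg hp, h a (List.mem_cons_self) (by simpa using hp),
        ih (fun x hx => h x (List.mem_cons_of_mem a hx))]
      simp

-- flatMap respects pointwise equality on the list
theorem flatMap_congr_mem {α β : Type} {l : List α} {f g : α → List β}
    (h : ∀ x ∈ l, f x = g x) : l.flatMap f = l.flatMap g := by
  induction l with
  | nil => rfl
  | cons a t ih =>
    rw [List.flatMap_cons, List.flatMap_cons, h a List.mem_cons_self,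
      ih (fun x hx => h x (List.mem_cons_of_mem a hx))]

-- A reduced to canonical form: flatMap over the clamped x range of the clamped y range
-- filtered by the center test
theorem A_canon (c : Int × Int) (d L : Int) :
    get_neighbor_coords c d L
      = (PySem.List.pyRange (max 0 (c.1 - d)) (min (c.1 + d) (L - 2) + 1) 1).flatMap (fun ax =>
          ((PySem.List.pyRange (max 0 (c.2 - d)) (min (c.2 + d) (L - 2) + 1) 1).filter (fun ay =>
            decide (¬(ax = c.1 ∧ ay = c.2)))).map (fun ay => (ax, ay))) := by
  unfold get_neighbor_coords
  have hA_inner : ∀ (x : Int) (r : List (Int × Int)),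
      (PySem.List.pyRange (0 - d) (d + 1) 1).foldl (fun result y =>
        let a_y := c.2 + y
        if c.1 + x ≥ 0 ∧ c.1 + x < L - 1 then
          if a_y ≥ 0 ∧ a_y < L - 1 then
            if x ≠ 0 ∨ y ≠ 0 then result ++ [(c.1 + x, a_y)]
            else result
          else result
        else result) r
      = r ++ ((PySem.List.pyRange (0 - d) (d + 1) 1).filter (fun y =>
          decide ((c.1 + x ≥ 0 ∧ c.1 + x < L - 1) ∧ (c.2 + y ≥ 0 ∧ c.2 + y < L - 1) ∧ (x ≠ 0 ∨ y ≠ 0)))).map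
            (fun y => (c.1 + x, c.2 + y)) := by
    intro x r
    rw [show (fun (result : List (Int × Int)) (y : Int) =>
        let a_y := c.2 + y
        if c.1 + x ≥ 0 ∧ c.1 + x < L - 1 then
          if a_y ≥ 0 ∧ a_y < L - 1 then
            if x ≠ 0 ∨ y ≠ 0 then result ++ [(c.1 + x, a_y)]
            else result
          else result
        else result)
      = (fun result y =>
        if (c.1 + x ≥ 0 ∧ c.1 + x < L - 1) ∧ (c.2 + y ≥ 0 ∧ c.2 + y < L - 1) ∧ (x ≠ 0 ∨ y ≠ 0)
        then result ++ [(c.1 + x, c.2 + y)] else result) from by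
        funext r y; simp only []; split_ifs <;> tauto]
    exact PySem.List.foldl_append_ite
      (fun y => (c.1 + x ≥ 0 ∧ c.1 + x < L - 1) ∧ (c.2 + y ≥ 0 ∧ c.2 + y < L - 1) ∧ (x ≠ 0 ∨ y ≠ 0))
      (fun y => (c.1 + x, c.2 + y)) _ r
  rw [show (fun (result : List (Int × Int)) (x : Int) =>
      let a_x := c.1 + x
      (PySem.List.pyRange (0 - d) (d + 1) 1).foldl (fun result y =>
        let a_y := c.2 + y
        if a_x ≥ 0 ∧ a_x < L - 1 then
          if a_y ≥ 0 ∧ a_y < L - 1 then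
            if x ≠ 0 ∨ y ≠ 0 then result ++ [(a_x, a_y)]
            else result
          else result
        else result) result)
    = (fun result x => result ++ ((PySem.List.pyRange (0 - d) (d + 1) 1).filter (fun y =>
        decide ((c.1 + x ≥ 0 ∧ c.1 + x < L - 1) ∧ (c.2 + y ≥ 0 ∧ c.2 + y < L - 1) ∧ (x ≠ 0 ∨ y ≠ 0)))).map
          (fun y => (c.1 + x, c.2 + y))) from by
      funext r x; exact hA_inner x r]
  rw [PySem.List.foldl_append_eq_flatMap]
  simp only [List.nil_append]
  have h1 : ∀ x : Int,
      ((PySem.List.pyRange (0 - d) (d + 1) 1).filter (fun y =>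
        decide ((c.1 + x ≥ 0 ∧ c.1 + x < L - 1) ∧ (c.2 + y ≥ 0 ∧ c.2 + y < L - 1) ∧ (x ≠ 0 ∨ y ≠ 0)))).map
          (fun y => (c.1 + x, c.2 + y))
      = ((PySem.List.pyRange (c.2 - d) (c.2 + d + 1) 1).filter (fun ay =>
        decide ((0 ≤ c.1 + x ∧ c.1 + x < L - 1) ∧ (0 ≤ ay ∧ ay < L - 1) ∧ ¬(c.1 + x = c.1 ∧ ay = c.2)))).map
          (fun ay => (c.1 + x, ay)) := by
    intro x
    have hys : PySem.List.pyRange (0 - d) (d + 1) 1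
        = (PySem.List.pyRange (c.2 - d) (c.2 + d + 1) 1).map (fun v => -c.2 + v) := by
      rw [pyRange_shift]; congr 1 <;> ring
    rw [hys, List.filter_map, List.map_map]
    rw [List.filter_congr (q := fun ay =>
        decide ((0 ≤ c.1 + x ∧ c.1 + x < L - 1) ∧ (0 ≤ ay ∧ ay < L - 1) ∧ ¬(c.1 + x = c.1 ∧ ay = c.2)))
      (fun ay _ => by simp only [Function.comp_apply, decide_eq_decide]; omega)]
    exact List.map_congr_left (fun ay _ => by
      simp only [Function.comp_apply, Prod.mk.injEq, true_and]; omega)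
  rw [flatMap_congr_mem (fun x _ => h1 x)]
  have hxs : PySem.List.pyRange (0 - d) (d + 1) 1
      = (PySem.List.pyRange (c.1 - d) (c.1 + d + 1) 1).map (fun v => -c.1 + v) := by
    rw [pyRange_shift]; congr 1 <;> ring
  rw [hxs, List.flatMap_map]
  have h2 : ∀ ax : Int,
      ((PySem.List.pyRange (c.2 - d) (c.2 + d + 1) 1).filter (fun ay =>
        decide ((0 ≤ c.1 + (-c.1 + ax) ∧ c.1 + (-c.1 + ax) < L - 1) ∧ (0 ≤ ay ∧ ay < L - 1) ∧
          ¬(c.1 + (-c.1 + ax) = c.1 ∧ ay = c.2)))).map (fun ay => (c.1 + (-c.1 + ax), ay))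
      = ((PySem.List.pyRange (c.2 - d) (c.2 + d + 1) 1).filter (fun ay =>
        decide ((0 ≤ ax ∧ ax < L - 1) ∧ (0 ≤ ay ∧ ay < L - 1) ∧ ¬(ax = c.1 ∧ ay = c.2)))).map
          (fun ay => (ax, ay)) := by
    intro ax
    rw [List.filter_congr (q := fun ay =>
        decide ((0 ≤ ax ∧ ax < L - 1) ∧ (0 ≤ ay ∧ ay < L - 1) ∧ ¬(ax = c.1 ∧ ay = c.2)))
      (fun ay _ => by simp only [decide_eq_decide]; omega)]
    exact List.map_congr_left (fun ay _ => by
      simp only [Prod.mk.injEq, and_true]; omega)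
  rw [flatMap_congr_mem (fun ax _ => h2 ax)]
  rw [flatMap_filter_of_nil (PySem.List.pyRange (c.1 - d) (c.1 + d + 1) 1)
    (fun ax => decide (0 ≤ ax ∧ ax < L - 1)) _
    (fun ax _ hax => by
      rw [List.filter_eq_nil_iff.mpr (fun ay _ => by
        simp only [decide_eq_false_iff_not] at hax
        simp only [decide_eq_true_eq]
        tauto)]
      rfl)]
  rw [pyRange_filter_interval]
  rw [show max (c.1 - d) 0 = max 0 (c.1 - d) by omega,
    show min (c.1 + d + 1) (L - 1) = min (c.1 + d) (L - 2) + 1 by omega]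
  refine flatMap_congr_mem (fun ax hax => ?_)
  rw [PySem.List.mem_pyRange_one] at hax
  rw [List.filter_congr (q := fun ay =>
      (decide (¬(ax = c.1 ∧ ay = c.2))) && (decide (0 ≤ ay ∧ ay < L - 1)))
    (fun ay _ => by
      beta_reduce
      rw [← Bool.decide_and, decide_eq_decide]
      omega)]
  rw [← List.filter_filter, pyRange_filter_interval]
  rw [show max (c.2 - d) 0 = max 0 (c.2 - d) by omega,
    show min (c.2 + d + 1) (L - 1) = min (c.2 + d) (L - 2) + 1 by omega]

-- flat-index decode over Nat ranges: range(m*n) decoded by divmod is the row-major product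
theorem range_mul_decode {α : Type} (m n : Nat) (f : Nat → Nat → α) :
    (List.range (m * n)).map (fun i => f (i / n) (i % n))
      = (List.range m).flatMap (fun a => (List.range n).map (fun b => f a b)) := by
  induction m with
  | zero => simp
  | succ m ih =>
    rw [Nat.succ_mul, List.range_add, List.map_append, List.map_map, List.range_succ,
      List.flatMap_append, ← ih]
    simp only [List.flatMap_cons, List.flatMap_nil, List.append_nil]
    congr 1
    apply List.map_congr_left
    intro j hj
    rw [List.mem_range] at hj
    have hn : 0 < n := by omega
    have h1 : (m * n + j) / n = m := by
      rw [Nat.mul_comm, Nat.mul_add_div hn, Nat.div_eq_of_lt hj, Nat.add_zero]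
    have h2 : (m * n + j) % n = j := by
      rw [Nat.mul_comm, Nat.mul_add_mod, Nat.mod_eq_of_lt hj]
    simp [Function.comp, h1, h2]

-- the same over integer pyRanges
theorem decode_eq_rect (xlo ylo nx ny : Int) (hx : 0 < nx) (hy : 0 < ny) :
    (PySem.List.pyRange 0 (nx * ny) 1).map
        (fun i => ((xlo + PySem.Int.floordiv i ny, ylo + PySem.Int.mod i ny) : Int × Int))
      = (PySem.List.pyRange xlo (xlo + nx) 1).flatMap (fun x =>
          (PySem.List.pyRange ylo (ylo + ny) 1).map (fun y => (x, y))) := by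
  obtain ⟨m, rfl⟩ := Int.eq_ofNat_of_zero_le hx.le
  obtain ⟨n, rfl⟩ := Int.eq_ofNat_of_zero_le hy.le
  rw [show ((m : Int) * (n : Int)) = ((m * n : Nat) : Int) from by push_cast; ring]
  rw [PySem.List.pyRange_one 0, PySem.List.pyRange_one xlo, PySem.List.pyRange_one ylo]
  rw [show (((m * n : Nat) : Int) - 0).toNat = m * n by omega,
    show (xlo + (m : Int) - xlo).toNat = m by omega,
    show (ylo + (n : Int) - ylo).toNat = n by omega]
  rw [List.map_map, List.flatMap_map]
  rw [show ((fun i => ((xlo + PySem.Int.floordiv i (n : Int), ylo + PySem.Int.mod i (n : Int)) : Int × Int))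
        ∘ (fun k : Nat => (0 : Int) + k))
      = (fun k : Nat => ((xlo + ((k / n : Nat) : Int), ylo + ((k % n : Nat) : Int)) : Int × Int)) from by
    funext k
    simp only [Function.comp_apply, Int.zero_add]
    rw [PySem.Int.floordiv_natCast, PySem.Int.mod_natCast]]
  rw [range_mul_decode m n (fun a b => ((xlo + (a : Int), ylo + (b : Int)) : Int × Int))]
  refine flatMap_congr_mem (fun a _ => ?_)
  rw [List.map_map]
  rfl

-- a strictly increasing row filtered at its member cy is the row with index (cy - ylo) erased
theorem filter_ne_eq_eraseIdx {α : Type} (ylo yhi cy : Int) (h1 : ylo ≤ cy) (h2 : cy ≤ yhi)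
    (f : Int → α) :
    ((PySem.List.pyRange ylo (yhi + 1) 1).filter (fun y => decide (¬ y = cy))).map f
      = ((PySem.List.pyRange ylo (yhi + 1) 1).map f).eraseIdx (cy - ylo).toNat := by
  rw [PySem.List.pyRange_one_append ylo cy (yhi + 1) h1 (by omega),
    PySem.List.pyRange_one_cons (show cy < yhi + 1 by omega)]
  have hpre : (PySem.List.pyRange ylo cy 1).filter (fun y => decide (¬ y = cy))
      = PySem.List.pyRange ylo cy 1 :=
    List.filter_eq_self.mpr (fun y hy => by
      rw [PySem.List.mem_pyRange_one] at hy
      simp only [decide_eq_true_eq]; omega)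
  have hpost : (PySem.List.pyRange (cy + 1) (yhi + 1) 1).filter (fun y => decide (¬ y = cy))
      = PySem.List.pyRange (cy + 1) (yhi + 1) 1 :=
    List.filter_eq_self.mpr (fun y hy => by
      rw [PySem.List.mem_pyRange_one] at hy
      simp only [decide_eq_true_eq]; omega)
  have hcen : (decide (¬ cy = cy)) = false := by simp
  rw [List.filter_append, List.filter_cons, hpre, hpost, hcen]
  simp only [Bool.false_eq_true, if_false]
  rw [List.map_append, List.map_append, List.map_cons]
  rw [List.eraseIdx_append_of_length_le
    (by rw [List.length_map, PySem.List.length_pyRange_one])]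
  rw [show (cy - ylo).toNat - ((PySem.List.pyRange ylo cy 1).map f).length = 0 from by
    rw [List.length_map, PySem.List.length_pyRange_one]; omega]
  rfl

-- the length of a flatMap of full rows
theorem length_flatMap_rows (xs : List Int) (ylo yhi : Int) :
    (xs.flatMap (fun x => (PySem.List.pyRange ylo (yhi + 1) 1).map (fun y => ((x, y) : Int × Int)))).length
      = xs.length * (yhi + 1 - ylo).toNat := by
  induction xs with
  | nil => simp
  | cons a t ih =>
    rw [List.flatMap_cons, List.length_append, ih, List.length_map,
      PySem.List.length_pyRange_one, List.length_cons, Nat.succ_mul]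
    omega

-- B reduced to the same canonical form
theorem B_canon (c : Int × Int) (d L : Int) :
    get_neighbor_coords_alt c d L
      = (PySem.List.pyRange (max 0 (c.1 - d)) (min (c.1 + d) (L - 2) + 1) 1).flatMap (fun ax =>
          ((PySem.List.pyRange (max 0 (c.2 - d)) (min (c.2 + d) (L - 2) + 1) 1).filter (fun ay =>
            decide (¬(ax = c.1 ∧ ay = c.2)))).map (fun ay => (ax, ay))) := by
  unfold get_neighbor_coords_alt
  set xlo := max 0 (c.1 - d) with hxlo
  set xhi := min (c.1 + d) (L - 2) with hxhi
  set ylo := max 0 (c.2 - d) with hylo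
  set yhi := min (c.2 + d) (L - 2) with hyhi
  by_cases hdeg : xhi - xlo + 1 ≤ 0 ∨ yhi - ylo + 1 ≤ 0
  · rw [if_pos hdeg]
    rcases hdeg with h | h
    · rw [PySem.List.pyRange_one_eq_nil (show xhi + 1 ≤ xlo by omega)]
      rfl
    · rw [PySem.List.pyRange_one_eq_nil (show yhi + 1 ≤ ylo by omega)]
      simp
  · rw [if_neg hdeg]
    push Not at hdeg
    obtain ⟨hx, hy⟩ := hdeg
    rw [decode_eq_rect xlo ylo (xhi - xlo + 1) (yhi - ylo + 1) (by omega) (by omega)]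
    rw [show xlo + (xhi - xlo + 1) = xhi + 1 by ring, show ylo + (yhi - ylo + 1) = yhi + 1 by ring]
    by_cases hc : xlo ≤ c.1 ∧ c.1 ≤ xhi ∧ ylo ≤ c.2 ∧ c.2 ≤ yhi
    · rw [if_pos hc]
      obtain ⟨hc1, hc2, hc3, hc4⟩ := hc
      rw [PySem.List.pyRange_one_append xlo c.1 (xhi + 1) hc1 (by omega),
        PySem.List.pyRange_one_cons (show c.1 < xhi + 1 by omega)]
      simp only [List.flatMap_append, List.flatMap_cons]
      -- erase the center from the middle row
      have hpre : ((PySem.List.pyRange xlo c.1 1).flatMap (fun x =>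
          (PySem.List.pyRange ylo (yhi + 1) 1).map (fun y => ((x, y) : Int × Int)))).length
          = (c.1 - xlo).toNat * (yhi + 1 - ylo).toNat := by
        rw [length_flatMap_rows, PySem.List.length_pyRange_one]
      have hk : ((c.1 - xlo) * (yhi - ylo + 1) + (c.2 - ylo)).toNat
          = (c.1 - xlo).toNat * (yhi + 1 - ylo).toNat + (c.2 - ylo).toNat := by
        obtain ⟨p, hp⟩ := Int.eq_ofNat_of_zero_le (show (0:Int) ≤ c.1 - xlo by omega)
        obtain ⟨q, hq⟩ := Int.eq_ofNat_of_zero_le (show (0:Int) ≤ c.2 - ylo by omega)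
        obtain ⟨r, hr⟩ := Int.eq_ofNat_of_zero_le (show (0:Int) ≤ yhi - ylo + 1 by omega)
        rw [hp, hq, hr, show yhi + 1 - ylo = ((r : Nat) : Int) by omega]
        rw [← Nat.cast_mul, ← Nat.cast_add, Int.toNat_natCast]
        simp
      rw [hk, ← hpre, List.eraseIdx_append_of_length_le (by omega),
        Nat.add_sub_cancel_left]
      rw [List.eraseIdx_append_of_lt_length (by
        rw [List.length_map, PySem.List.length_pyRange_one]; omega)]
      congr 1
      · -- rows left of the center column are unfiltered
        refine flatMap_congr_mem (fun x hxm => ?_)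
        rw [PySem.List.mem_pyRange_one] at hxm
        rw [List.filter_eq_self.mpr (fun y _ => by
          simp only [decide_eq_true_eq]; omega)]
      congr 1
      · -- the center row: the filter is exactly erasing index (c.2 - ylo)
        rw [List.filter_congr (q := fun ay => decide (¬ ay = c.2)) (fun ay _ => by
          simp only [decide_eq_decide]; tauto)]
        rw [filter_ne_eq_eraseIdx ylo yhi c.2 hc3 hc4]
      · -- rows right of the center column are unfiltered
        refine flatMap_congr_mem (fun x hxm => ?_)
        rw [PySem.List.mem_pyRange_one] at hxm
        rw [List.filter_eq_self.mpr (fun y _ => by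
          simp only [decide_eq_true_eq]; omega)]
    · rw [if_neg hc]
      symm
      refine flatMap_congr_mem (fun x hxm => ?_)
      rw [PySem.List.mem_pyRange_one] at hxm
      rw [List.filter_eq_self.mpr (fun y hym => by
        rw [PySem.List.mem_pyRange_one] at hym
        simp only [decide_eq_true_eq]
        rintro ⟨rfl, rfl⟩
        exact hc ⟨hxm.1, by omega, hym.1, by omega⟩)]

-- ===== VERDICT (by name: the statement is the Claim_ definition above) =====
theorem get_neighbor_coords_spec : Claim_equal_get_neighbor_coords := by
  intro c d L _
  unfold Spec_get_neighbor_coords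
  rw [A_canon, B_canon]
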